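-- pv_equiv track=rewrite | github.com/kurosiro2/n-gram | statistics/data_loader.py | _resolve_groups_for_entries
-- ===== SOURCE A (Python) =====
-- BACKFILL_EARLIEST_GROUP = False
--
-- def _resolve_groups_for_entries(date: int, entries):
--     """
--     entries = [(start_date, set(groups)), ...] (start_date 昇順）
--     の中から、指定した date に対応する groups を返す共通ロジック。
--     """
--     first_date, first_groups = entries[0]
--
--     if date < first_date:
--         if BACKFILL_EARLIEST_GROUP:
--             return set(first_groups)
--         else:
--             return set()
--
--     chosen_groups = None
--     for start_date, groups in entries:
--         if start_date <= date:
--             chosen_groups = groups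
--         else:
--             break
--
--     return set(chosen_groups) if chosen_groups is not None else set()
-- ===== SOURCE B (Python) =====
-- def _resolve_groups_for_entries(date, entries):
--     def applicable(rest):
--         """Longest prefix of rest whose start_date <= date, built recursively."""
--         if rest and rest[0][0] <= date:
--             return [rest[0]] + applicable(rest[1:])
--         return []
--     pre = applicable(entries)
--     return set(pre[-1][1]) if pre else set()
-- ===== Notes on version B (the rewrite author's own statement) =====
-- stated objective: alternative
-- what changed: Instead of A's single imperative scan with a chosen_groups/None sentinel, break, and a first-element special case, B recursively builds the applicable prefix (entries with start_date <= date up to the first that is not) as a list and then returns the set of its last element's groups, with no sentinel and no special case.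
import Mathlib
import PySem

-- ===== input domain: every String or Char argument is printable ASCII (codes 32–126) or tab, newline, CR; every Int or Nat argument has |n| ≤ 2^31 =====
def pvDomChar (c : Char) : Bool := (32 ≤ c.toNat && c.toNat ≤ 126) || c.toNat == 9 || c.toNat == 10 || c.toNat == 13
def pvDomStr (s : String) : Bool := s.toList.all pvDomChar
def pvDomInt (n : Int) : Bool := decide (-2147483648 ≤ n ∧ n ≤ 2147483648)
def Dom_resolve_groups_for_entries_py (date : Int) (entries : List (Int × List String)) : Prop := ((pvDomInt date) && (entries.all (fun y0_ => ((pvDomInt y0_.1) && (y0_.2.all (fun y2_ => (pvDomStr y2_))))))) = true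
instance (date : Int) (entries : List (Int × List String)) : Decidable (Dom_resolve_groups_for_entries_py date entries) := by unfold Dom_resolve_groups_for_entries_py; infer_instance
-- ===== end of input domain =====

-- B replaces A's sentinel-accumulator scan (chosen_groups/None, break, first-element special
-- case) by recursively building the applicable prefix and taking its last element (alternative).

-- ===== PORT A =====
def pvBackfillEarliestGroup : Bool := false

-- the 'for start_date, groups in entries: …' loop with its break, acc = chosen_groups
def pvLoopA (date : Int) : List (Int × List String) → Option (List String) → Option (List String)
  | [], acc => acc
  | (s, g) :: t, acc => if s ≤ date then pvLoopA date t (some g) else acc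

def resolve_groups_for_entries_py (date : Int) (entries : List (Int × List String)) : List String :=
  match entries with
  | [] => []  -- Python raises IndexError on entries[0]; excluded by Pre_
  | (first_date, first_groups) :: _ =>
    if date < first_date then
      (if pvBackfillEarliestGroup then PySem.Set.ofList first_groups else [])
    else
      match pvLoopA date entries none with
      | none => []
      | some g => PySem.Set.ofList g

-- ===== PORT B =====
-- Source B's 'applicable': the longest prefix whose start_date ≤ date, built recursively
def pvApplicable (date : Int) : List (Int × List String) → List (Int × List String)
  | [] => []
  | (s, g) :: t => if s ≤ date then (s, g) :: pvApplicable date t else []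

-- 'set(pre[-1][1]) if pre else set()'
def resolve_groups_for_entries_py_alt (date : Int) (entries : List (Int × List String)) : List String :=
  let pre := pvApplicable date entries
  match pre.getLast? with
  | none => []
  | some (_, g) => PySem.Set.ofList g

-- ===== PRECONDITION & SPEC =====
-- Pre_ excludes only the empty list, on which A raises IndexError at entries[0].
def Pre_resolve_groups_for_entries_py (date : Int) (entries : List (Int × List String)) : Prop :=
  entries.isEmpty = false
instance (date : Int) (entries : List (Int × List String)) : Decidable (Pre_resolve_groups_for_entries_py date entries) := by unfold Pre_resolve_groups_for_entries_py; infer_instance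

def pvWitness_resolve_groups_for_entries_py : Int × (List (Int × List String)) :=
  (5, [(1, ["a"]), (3, ["b", "c"]), (8, ["d"])])

def Spec_resolve_groups_for_entries_py (date : Int) (entries : List (Int × List String)) (out : List String) : Prop := out = resolve_groups_for_entries_py_alt date entries
instance (date : Int) (entries : List (Int × List String)) (out : List String) : Decidable (Spec_resolve_groups_for_entries_py date entries out) := by unfold Spec_resolve_groups_for_entries_py; infer_instance

-- ===== CLAIM (what is proved, stated in full; the proofs are below) =====
def Claim_equal_resolve_groups_for_entries_py : Prop := ∀ (date : Int) (entries : List (Int × List String)), Dom_resolve_groups_for_entries_py date entries → Pre_resolve_groups_for_entries_py date entries → Spec_resolve_groups_for_entries_py date entries (resolve_groups_for_entries_py date entries)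

-- ===== LEMMAS AND PROOFS =====

-- A's break-early accumulator loop returns the groups of the last element of B's applicable
-- prefix, falling back to the accumulator when that prefix is empty.
lemma pv_loopA_applicable (date : Int) (l : List (Int × List String)) (acc : Option (List String)) :
    pvLoopA date l acc =
      match (pvApplicable date l).getLast? with
      | none => acc
      | some (_, g) => some g := by
  induction l generalizing acc with
  | nil => simp [pvLoopA, pvApplicable]
  | cons x t ih =>
    obtain ⟨s, g⟩ := x
    simp only [pvLoopA, pvApplicable]
    by_cases hsd : s ≤ date
    · rw [if_pos hsd, if_pos hsd, ih]
      rcases h : (pvApplicable date t).getLast? with _ | ⟨_, g'⟩ <;>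
        simp [List.getLast?_cons, h]
    · rw [if_neg hsd, if_neg hsd]
      simp

-- ===== VERDICT (by name: the statement is the Claim_ definition above) =====
theorem resolve_groups_for_entries_py_spec : Claim_equal_resolve_groups_for_entries_py := by
  intro date entries _ hne
  unfold Spec_resolve_groups_for_entries_py resolve_groups_for_entries_py resolve_groups_for_entries_py_alt
  match entries with
  | [] => simp [Pre_resolve_groups_for_entries_py] at hne
  | (f, g) :: t =>
    by_cases hdf : date < f
    · have hgt : ¬ f ≤ date := by omega
      simp [hdf, pvBackfillEarliestGroup, pvApplicable, hgt]
    · rw [pv_loopA_applicable]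
      rcases h : (pvApplicable date ((f, g) :: t)).getLast? with _ | ⟨_, g'⟩ <;> simp [hdf, h]
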